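-- pv_equiv track=rewrite | github.com/ImOutOfBounds/Python-Challenges | DifferenceStr/main.py | findDifferentLetter
-- ===== SOURCE A (Python) =====
-- def findDifferentLetter(word1="lweordtest1", word2="etanworstddr1o") -> str:
--     wordList1 = list(word1)
--     wordList2 = list(word2)
--
--     wordList1copy = wordList1.copy()
--
--
--     for i in range(len(wordList1)):
--         for j in range(len(wordList2)):
--             if wordList1[i] == wordList2[j]:
--                 wordList1copy.remove(wordList1[i])
--                 wordList2.remove(wordList2[j])
--                 break
--
--     res = wordList1copy + wordList2
--
--     return ''.join(res)
-- ===== SOURCE B (Python) =====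
-- def findDifferentLetter(word1="lweordtest1", word2="etanworstddr1o") -> str:
--     # One counting pass over each word, then one linear pass over each word:
--     # a char occurrence survives iff its occurrence index exceeds the other
--     # word's total count of that char.  O(n+m) instead of A's O(n*m).
--     cnt1 = {}
--     for ch in word1:
--         cnt1[ch] = cnt1.get(ch, 0) + 1
--     cnt2 = {}
--     for ch in word2:
--         cnt2[ch] = cnt2.get(ch, 0) + 1
--     out = []
--     seen = {}
--     for ch in word1:
--         seen[ch] = seen.get(ch, 0) + 1
--         if seen[ch] > cnt2.get(ch, 0):
--             out.append(ch)
--     seen = {}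
--     for ch in word2:
--         seen[ch] = seen.get(ch, 0) + 1
--         if seen[ch] > cnt1.get(ch, 0):
--             out.append(ch)
--     return ''.join(out)
-- ===== Notes on version B (the rewrite author's own statement) =====
-- stated objective: faster
-- what changed: Replaces A's nested scan-and-remove loops (repeated list.remove on two shrinking copies) by two counting dicts plus one linear pass over each word that keeps a char occurrence iff its occurrence index exceeds the other word's count of that char.
import Mathlib
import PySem

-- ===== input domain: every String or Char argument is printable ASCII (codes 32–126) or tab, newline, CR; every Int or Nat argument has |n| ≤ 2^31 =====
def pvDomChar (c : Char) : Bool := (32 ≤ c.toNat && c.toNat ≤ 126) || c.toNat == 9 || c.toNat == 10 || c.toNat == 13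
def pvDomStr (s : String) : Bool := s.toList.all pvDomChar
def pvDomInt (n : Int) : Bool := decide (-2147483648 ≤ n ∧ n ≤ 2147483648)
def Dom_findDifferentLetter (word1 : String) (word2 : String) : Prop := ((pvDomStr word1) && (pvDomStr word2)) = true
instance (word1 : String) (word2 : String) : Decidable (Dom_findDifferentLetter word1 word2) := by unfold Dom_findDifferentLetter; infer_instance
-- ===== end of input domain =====

-- B replaces A's quadratic scan-and-remove loops by two counting dicts and one
-- linear pass over each word (an occurrence survives iff its occurrence index
-- exceeds the other word's count of that char); measured faster at large sizes.

-- ===== PORT A =====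
-- inner loop 'for j in range(len(wordList2)): if wordList1[i] == wordList2[j]: … break'
-- ported as a structural scan over wordList2 (break at the first match)
def pvScanA (x : Char) : List Char → Bool
  | [] => false
  | y :: ys => if x = y then true else pvScanA x ys

-- one iteration of the outer loop body: on a match, copy.remove(x) and
-- wordList2.remove(wordList2[j]) (= remove first occurrence of x).
-- remove? is some here whenever Python's list.remove succeeds; .getD never fires
-- on reachable states (proved below via List.erase).
def pvStepA (st : List Char × List Char) (x : Char) : List Char × List Char :=
  if pvScanA x st.2 then
    ((PySem.List.remove? st.1 x).getD st.1, (PySem.List.remove? st.2 x).getD st.2)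
  else st

def findDifferentLetter (word1 : String) (word2 : String) : String :=
  let wordList1 := word1.toList
  let wordList2 := word2.toList
  let st := (PySem.List.pyRange 0 (wordList1.length : Int) 1).foldl
      (fun st j => pvStepA st (PySem.List.pyGetD wordList1 j ' ')) (wordList1, wordList2)
  String.mk (st.1 ++ st.2)

-- ===== PORT B =====
-- counting pass: cnt[ch] = cnt.get(ch, 0) + 1
def pvCountB (l : List Char) : PySem.Dict Char Int :=
  l.foldl (fun d ch => d.insert ch (d.getD ch 0 + 1)) PySem.Dict.empty

-- output pass: seen[ch] = seen.get(ch,0)+1; if seen[ch] > cnt.get(ch,0): out.append(ch)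
def pvPassB (cnt : PySem.Dict Char Int) (st : PySem.Dict Char Int × List Char) (ch : Char) :
    PySem.Dict Char Int × List Char :=
  let seen := st.1.insert ch (st.1.getD ch 0 + 1)
  if seen.getD ch 0 > cnt.getD ch 0 then (seen, st.2 ++ [ch]) else (seen, st.2)

def findDifferentLetter_alt (word1 : String) (word2 : String) : String :=
  let cnt1 := pvCountB word1.toList
  let cnt2 := pvCountB word2.toList
  let st1 := word1.toList.foldl (pvPassB cnt2) (PySem.Dict.empty, [])
  let st2 := word2.toList.foldl (pvPassB cnt1) (PySem.Dict.empty, st1.2)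
  String.mk st2.2

-- ===== PRECONDITION & SPEC =====
def Spec_findDifferentLetter (word1 : String) (word2 : String) (out : String) : Prop := out = findDifferentLetter_alt word1 word2
instance (word1 : String) (word2 : String) (out : String) : Decidable (Spec_findDifferentLetter word1 word2 out) := by unfold Spec_findDifferentLetter; infer_instance

-- ===== CLAIM (what is proved, stated in full; the proofs are below) =====
def Claim_equal_findDifferentLetter : Prop := ∀ (word1 : String) (word2 : String), Dom_findDifferentLetter word1 word2 → Spec_findDifferentLetter word1 word2 (findDifferentLetter word1 word2)

-- ===== LEMMAS AND PROOFS =====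

-- pointwise function update
def pvBump (f : Char → Nat) (x : Char) (n : Nat) : Char → Nat := fun y => if y = x then n else f y

-- drop, for each char y, the first (f y) occurrences of y (fewer if absent)
def pvDrop (f : Char → Nat) : List Char → List Char
  | [] => []
  | x :: xs => if f x = 0 then x :: pvDrop f xs else pvDrop (pvBump f x (f x - 1)) xs

theorem pvDrop_congr (f g : Char → Nat) (l : List Char)
    (h : ∀ y, min (f y) (l.count y) = min (g y) (l.count y)) : pvDrop f l = pvDrop g l := by
  induction l generalizing f g with
  | nil => rfl
  | cons x xs ih =>
    have hx := h x
    rw [List.count_cons_self] at hx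
    by_cases h0 : f x = 0
    · have hg0 : g x = 0 := by omega
      simp only [pvDrop, h0, hg0, if_pos]
      refine congrArg _ (ih _ _ fun y => ?_)
      by_cases hyx : y = x
      · subst hyx; simp [h0, hg0]
      · have := h y
        rwa [List.count_cons_of_ne (Ne.symm hyx)] at this
    · have hg0 : g x ≠ 0 := by omega
      simp only [pvDrop]
      rw [if_neg h0, if_neg hg0]
      refine ih _ _ fun y => ?_
      by_cases hyx : y = x
      · subst hyx; simp [pvBump]; omega
      · have := h y
        rw [List.count_cons_of_ne (Ne.symm hyx)] at this
        simpa [pvBump, hyx] using this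

theorem pvDrop_count (f : Char → Nat) (l : List Char) (x : Char) :
    (pvDrop f l).count x = l.count x - f x := by
  induction l generalizing f with
  | nil => simp [pvDrop]
  | cons y ys ih =>
    by_cases h0 : f y = 0
    · simp only [pvDrop]
      rw [if_pos h0]
      by_cases hxy : x = y
      · subst hxy
        rw [List.count_cons_self, List.count_cons_self, ih]
        omega
      · rw [List.count_cons_of_ne (Ne.symm hxy), List.count_cons_of_ne (Ne.symm hxy), ih]
    · simp only [pvDrop]
      rw [if_neg h0, ih]
      by_cases hxy : x = y
      · subst hxy
        rw [List.count_cons_self]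
        simp [pvBump]
        omega
      · rw [List.count_cons_of_ne (Ne.symm hxy)]
        simp [pvBump, hxy]

theorem pvDrop_erase (f : Char → Nat) (l : List Char) (x : Char) :
    (pvDrop f l).erase x = pvDrop (pvBump f x (f x + 1)) l := by
  induction l generalizing f with
  | nil => rfl
  | cons y ys ih =>
    by_cases hxy : x = y
    · subst hxy
      by_cases h0 : f x = 0
      · simp only [pvDrop]
        rw [if_pos h0, List.erase_cons_head, if_neg (by simp [pvBump])]
        refine pvDrop_congr _ _ _ fun z => ?_
        by_cases hzx : z = x <;> simp [pvBump, hzx, h0]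
      · simp only [pvDrop]
        rw [if_neg h0, if_neg (by simp [pvBump]), ih]
        refine pvDrop_congr _ _ _ fun z => ?_
        by_cases hzx : z = x <;> simp [pvBump, hzx] <;> omega
    · have hby : pvBump f x (f x + 1) y = f y := by simp [pvBump, Ne.symm hxy]
      by_cases h0 : f y = 0
      · simp only [pvDrop]
        rw [if_pos h0, if_pos (by rw [hby]; exact h0),
            List.erase_cons_tail (by simp; exact fun h => hxy h.symm), ih]
      · simp only [pvDrop]
        rw [if_neg h0, if_neg (by rw [hby]; exact h0), ih]
        refine pvDrop_congr _ _ _ fun z => ?_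
        by_cases hzx : z = x
        · subst hzx
          simp [pvBump, hxy, Ne.symm hxy]
        · by_cases hzy : z = y
          · subst hzy
            simp [pvBump, hzx]
          · simp [pvBump, hzx, hzy]

theorem pvDrop_append (f : Char → Nat) (a b : List Char) :
    pvDrop f (a ++ b) = pvDrop f a ++ pvDrop (fun y => f y - a.count y) b := by
  induction a generalizing f with
  | nil => simp [pvDrop]
  | cons x xs ih =>
    by_cases h0 : f x = 0
    · rw [List.cons_append]
      simp only [pvDrop]
      rw [if_pos h0, if_pos h0, ih, List.cons_append]
      refine congrArg _ (congrArg _ (pvDrop_congr _ _ _ fun z => ?_))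
      by_cases hzx : z = x
      · subst hzx; rw [List.count_cons_self]; omega
      · rw [List.count_cons_of_ne (Ne.symm hzx)]
    · rw [List.cons_append]
      simp only [pvDrop]
      rw [if_neg h0, if_neg h0, ih]
      refine congrArg _ (pvDrop_congr _ _ _ fun z => ?_)
      by_cases hzx : z = x
      · subst hzx; rw [List.count_cons_self]; simp [pvBump]; omega
      · rw [List.count_cons_of_ne (Ne.symm hzx)]; simp [pvBump, hzx]

theorem pvScanA_eq (x : Char) (l : List Char) : pvScanA x l = l.contains x := by
  induction l with
  | nil => rfl
  | cons y ys ih =>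
    by_cases h : x = y <;> simp [pvScanA, h, ih]

theorem remove_getD_eq_erase (l : List Char) (x : Char) :
    (PySem.List.remove? l x).getD l = l.erase x := by
  by_cases h : x ∈ l
  · rw [PySem.List.remove?_eq_some_erase l x h]; rfl
  · rw [(PySem.List.remove?_eq_none_iff l x).mpr h, List.erase_of_not_mem h]; rfl

theorem pvStepA_eq (st : List Char × List Char) (x : Char) :
    pvStepA st x = if st.2.count x > 0 then (st.1.erase x, st.2.erase x) else st := by
  unfold pvStepA
  rw [pvScanA_eq, remove_getD_eq_erase, remove_getD_eq_erase]
  by_cases h : x ∈ st.2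
  · simp [h, List.count_pos_iff.mpr h]
  · simp [h, List.count_eq_zero.mpr h]

-- main invariant of A's outer loop
theorem pvA_loop (w2 : List Char) (r p : List Char) :
    r.foldl pvStepA
      (pvDrop (fun y => w2.count y) p ++ r, pvDrop (fun y => min (p.count y) (w2.count y)) w2)
    = (pvDrop (fun y => w2.count y) (p ++ r),
       pvDrop (fun y => min ((p ++ r).count y) (w2.count y)) w2) := by
  induction r generalizing p with
  | nil => simp
  | cons x r' ih =>
    rw [List.foldl_cons, pvStepA_eq]
    have hcnt : (pvDrop (fun y => min (p.count y) (w2.count y)) w2).count x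
        = w2.count x - min (p.count x) (w2.count x) := pvDrop_count _ _ _
    by_cases hc : p.count x < w2.count x
    · have hpos : (pvDrop (fun y => min (p.count y) (w2.count y)) w2).count x > 0 := by omega
      rw [if_pos hpos]
      have hxnot : x ∉ pvDrop (fun y => w2.count y) p := by
        intro hmem
        have h1 := pvDrop_count (fun y => w2.count y) p x
        have h2 := List.count_pos_iff.mpr hmem
        omega
      have hcopy : (pvDrop (fun y => w2.count y) p ++ x :: r').erase x
          = pvDrop (fun y => w2.count y) (p ++ [x]) ++ r' := by
        rw [List.erase_append_right _ hxnot, List.erase_cons_head, pvDrop_append]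
        have hnil : pvDrop (fun y => (fun y => w2.count y) y - p.count y) [x] = [] := by
          have hne : w2.count x - p.count x ≠ 0 := by omega
          simp only [pvDrop]
          rw [if_neg hne]
        rw [hnil, List.append_nil]
      have hw2 : (pvDrop (fun y => min (p.count y) (w2.count y)) w2).erase x
          = pvDrop (fun y => min ((p ++ [x]).count y) (w2.count y)) w2 := by
        rw [pvDrop_erase]
        refine pvDrop_congr _ _ _ fun z => ?_
        by_cases hzx : z = x
        · subst hzx
          simp [pvBump, List.count_append]
          omega
        · have hxz : ¬ x = z := fun h => hzx h.symm
          simp [pvBump, hzx, List.count_append, hxz]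
      have := ih (p ++ [x])
      rw [hcopy] at *
      simp only [List.append_assoc, List.cons_append, List.nil_append] at this ⊢
      rw [← hw2] at this
      exact this
    · have hzero : ¬ ((pvDrop (fun y => min (p.count y) (w2.count y)) w2).count x > 0) := by omega
      rw [if_neg hzero]
      have hcopy : pvDrop (fun y => w2.count y) p ++ x :: r'
          = pvDrop (fun y => w2.count y) (p ++ [x]) ++ r' := by
        rw [pvDrop_append]
        have h0 : w2.count x - p.count x = 0 := by omega
        simp only [pvDrop]
        rw [if_pos h0]
        simp
      have hw2 : pvDrop (fun y => min (p.count y) (w2.count y)) w2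
          = pvDrop (fun y => min ((p ++ [x]).count y) (w2.count y)) w2 := by
        refine pvDrop_congr _ _ _ fun z => ?_
        by_cases hzx : z = x
        · subst hzx
          simp [List.count_append]
          omega
        · have hxz : ¬ x = z := fun h => hzx h.symm
          simp [List.count_append, hxz]
      have := ih (p ++ [x])
      rw [hcopy, hw2]
      simpa [List.append_assoc] using this

-- B's pass, as a recursion (what the foldl computes in its .2 component)
theorem pvPassB_out (cnt : PySem.Dict Char Int) (l : List Char)
    (seen : PySem.Dict Char Int) (acc : List Char) (f : Char → Nat)
    (hf : ∀ y, f y = (cnt.getD y 0 - seen.getD y 0).toNat) :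
    (l.foldl (pvPassB cnt) (seen, acc)).2 = acc ++ pvDrop f l := by
  induction l generalizing seen acc f with
  | nil => simp [pvDrop]
  | cons x xs ih =>
    rw [List.foldl_cons]
    by_cases hk : seen.getD x 0 + 1 > cnt.getD x 0
    · have hstep : pvPassB cnt (seen, acc) x
          = (seen.insert x (seen.getD x 0 + 1), acc ++ [x]) := by
        unfold pvPassB
        simp only [PySem.Dict.getD_insert_self]
        rw [if_pos hk]
      have hf0 : f x = 0 := by have := hf x; omega
      rw [hstep, ih (seen.insert x (seen.getD x 0 + 1)) (acc ++ [x]) f ?_]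
      · simp only [pvDrop]
        rw [if_pos hf0]
        simp
      · intro y
        by_cases hyx : y = x
        · subst hyx
          rw [PySem.Dict.getD_insert_self]
          have := hf y
          omega
        · rw [PySem.Dict.getD_insert_of_ne _ _ _ (fun h => hyx h)]
          exact hf y
    · have hstep : pvPassB cnt (seen, acc) x
          = (seen.insert x (seen.getD x 0 + 1), acc) := by
        unfold pvPassB
        simp only [PySem.Dict.getD_insert_self]
        rw [if_neg hk]
      have hfpos : f x ≠ 0 := by have := hf x; omega
      rw [hstep, ih (seen.insert x (seen.getD x 0 + 1)) acc (pvBump f x (f x - 1)) ?_]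
      · simp only [pvDrop]
        rw [if_neg hfpos]
      · intro y
        by_cases hyx : y = x
        · subst hyx
          rw [PySem.Dict.getD_insert_self,
            show pvBump f y (f y - 1) y = f y - 1 by simp [pvBump]]
          have := hf y
          omega
        · rw [PySem.Dict.getD_insert_of_ne _ _ _ (fun h => hyx h)]
          simp only [pvBump]
          rw [if_neg hyx]
          exact hf y

theorem pvCountB_getD (l : List Char) (y : Char) : (pvCountB l).getD y 0 = (l.count y : Int) := by
  unfold pvCountB
  rw [PySem.Dict.getD_foldl_insert_add_one]
  simp

-- ===== VERDICT (by name: the statement is the Claim_ definition above) =====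
theorem findDifferentLetter_spec : Claim_equal_findDifferentLetter := by
  intro word1 word2 _
  unfold Spec_findDifferentLetter findDifferentLetter findDifferentLetter_alt
  dsimp only
  rw [PySem.List.foldl_pyRange_zero_pyGetD' word1.toList ' ' pvStepA]
  have hA := pvA_loop word2.toList word1.toList []
  simp only [show ∀ g : Char → Nat, pvDrop g [] = [] from fun g => rfl, List.nil_append, List.count_nil] at hA
  have h0 : pvDrop (fun y => min 0 (word2.toList.count y)) word2.toList = word2.toList := by
    have : pvDrop (fun _ => 0) word2.toList = word2.toList := by
      induction word2.toList with
      | nil => rfl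
      | cons x xs ih => simp [pvDrop, ih]
    simpa using this
  rw [h0] at hA
  rw [hA]
  have hp1 := pvPassB_out (pvCountB word2.toList) word1.toList PySem.Dict.empty []
      (fun y => word2.toList.count y)
      (by intro y; rw [pvCountB_getD]; simp [PySem.Dict.getD_empty])
  have hp2 := pvPassB_out (pvCountB word1.toList) word2.toList PySem.Dict.empty
      (pvDrop (fun y => word2.toList.count y) word1.toList)
      (fun y => word1.toList.count y)
      (by intro y; rw [pvCountB_getD]; simp [PySem.Dict.getD_empty])
  simp only [List.nil_append] at hp1
  rw [hp1, hp2]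
  dsimp only
  congr 1
  congr 1
  refine pvDrop_congr _ _ _ fun z => ?_
  simp
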